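-- pv_equiv track=rewrite | github.com/ntrejoandalon/adventOfCode | 2023/day3/challenge1.py | numLineRanges
-- ===== SOURCE A (Python) =====
-- def numLineRanges(line):
--     numbers = []
--     inNumber = False
--     start = 0
--
--     for i in range(len(line)):
--         c = line[i]
--         if not inNumber and c.isnumeric():
--             inNumber=True
--             start = i
--         elif inNumber and not c.isnumeric():
--             inNumber = False
--             numbers.append((line[start:i], start, i-1))
--
--     if inNumber:
--         numbers.append((line[start:], start, len(line) -1))
--
--     return numbers
-- ===== SOURCE B (Python) =====
-- def numLineRanges(line):
--     res = []
--     n = len(line)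
--     i = 0
--     while i < n:
--         if line[i].isnumeric():
--             j = i + 1
--             while j < n and line[j].isnumeric():
--                 j += 1
--             res.append((line[i:j], i, j - 1))
--             i = j
--         else:
--             i += 1
--     return res
-- ===== Notes on version B (the rewrite author's own statement) =====
-- stated objective: alternative
-- what changed: Replaces A's inNumber/start boolean state machine (with a post-loop fixup for a trailing run) by a stateless run scanner: on hitting a digit it scans the whole maximal digit run at once, emits the tuple immediately, and jumps past the run, so no flag and no trailing-run special case are needed.
import Mathlib
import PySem

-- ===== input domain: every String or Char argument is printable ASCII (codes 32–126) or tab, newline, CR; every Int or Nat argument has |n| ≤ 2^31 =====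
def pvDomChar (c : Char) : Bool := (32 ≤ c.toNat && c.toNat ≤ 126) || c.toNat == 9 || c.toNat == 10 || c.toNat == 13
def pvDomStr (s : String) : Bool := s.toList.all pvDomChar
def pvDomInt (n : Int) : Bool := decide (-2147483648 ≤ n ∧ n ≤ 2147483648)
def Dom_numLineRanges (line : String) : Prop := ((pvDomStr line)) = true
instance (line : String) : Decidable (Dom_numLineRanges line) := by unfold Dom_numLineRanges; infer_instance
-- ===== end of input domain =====

-- B replaces A's inNumber/start state machine by a stateless scanner that jumps over each
-- maximal digit run; same O(n) cost, no flag and no trailing-run fixup (objective: alternative).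
-- On the ASCII domain Dom_ , Python's str.isnumeric is exactly Char.isDigit ('0'-'9').

-- ===== PORT A =====
-- the for-loop: one step per character c = line[i], state (numbers, inNumber, start);
-- line[start:i] is PySem.List.slice on the full char list (exact: both bounds are in-range naturals)
def numLineRangesLoop (full : List Char) :
    List Char → Nat → (List (String × Int × Int) × Bool × Nat) →
    (List (String × Int × Int) × Bool × Nat)
  | [], _, st => st
  | c :: rest, i, (nums, inN, start) =>
    if !inN && c.isDigit then
      numLineRangesLoop full rest (i + 1) (nums, true, i)
    else if inN && !c.isDigit then
      numLineRangesLoop full rest (i + 1)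
        (nums ++ [(String.ofList (PySem.List.slice full (some (start : Int)) (some (i : Int))),
                   (start : Int), (i : Int) - 1)], false, start)
    else
      numLineRangesLoop full rest (i + 1) (nums, inN, start)

def numLineRanges (line : String) : List (String × Int × Int) :=
  let cs := line.toList
  match numLineRangesLoop cs cs 0 ([], false, 0) with
  | (nums, inN, start) =>
    if inN then
      nums ++ [(String.ofList (PySem.List.slice cs (some (start : Int)) none),
                (start : Int), (cs.length : Int) - 1)]
    else nums

-- ===== PORT B =====
-- Source B's outer while: skip a non-digit, or take the whole digit run (the inner while is
-- takeWhile/dropWhile on the remaining characters) and jump past it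
def numLineRangesRuns : List Char → Nat → List (String × Int × Int)
  | [], _ => []
  | c :: rest, i =>
    if c.isDigit then
      let tw := rest.takeWhile Char.isDigit
      (String.ofList (c :: tw), (i : Int), (i : Int) + (tw.length : Int)) ::
        numLineRangesRuns (rest.dropWhile Char.isDigit) (i + 1 + tw.length)
    else
      numLineRangesRuns rest (i + 1)
termination_by cs _ => cs.length
decreasing_by
  · simpa using Nat.lt_succ_of_le (List.length_dropWhile_le _ _)
  · simp

def numLineRanges_alt (line : String) : List (String × Int × Int) :=
  numLineRangesRuns line.toList 0

-- ===== PRECONDITION & SPEC =====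
def Spec_numLineRanges (line : String) (out : List (String × Int × Int)) : Prop := out = numLineRanges_alt line
instance (line : String) (out : List (String × Int × Int)) : Decidable (Spec_numLineRanges line out) := by unfold Spec_numLineRanges; infer_instance

-- ===== CLAIM (what is proved, stated in full; the proofs are below) =====
def Claim_equal_numLineRanges : Prop := ∀ (line : String), Dom_numLineRanges line → Spec_numLineRanges line (numLineRanges line)

-- ===== LEMMAS AND PROOFS =====

-- A's post-loop fixup, as a function of the loop's final state
def numLineRangesFinish (full : List Char) :
    (List (String × Int × Int) × Bool × Nat) → List (String × Int × Int)
  | (nums, inN, start) =>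
    if inN then
      nums ++ [(String.ofList (PySem.List.slice full (some (start : Int)) none),
                (start : Int), (full.length : Int) - 1)]
    else nums

-- the combined loop invariant: from state inNumber=false the loop produces exactly the runs of
-- the remaining characters; from inNumber=true it first finishes the current run `taken`
lemma numLineRanges_invariant (full : List Char) (rest : List Char) :
    (∀ (i start : Nat) (nums : List (String × Int × Int)),
      i ≤ full.length → rest = full.drop i →
      numLineRangesFinish full (numLineRangesLoop full rest i (nums, false, start)) =
        nums ++ numLineRangesRuns rest i) ∧
    (∀ (i start : Nat) (taken : List Char) (nums : List (String × Int × Int)),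
      i ≤ full.length → rest = full.drop i →
      full.drop start = taken ++ rest → i = start + taken.length →
      numLineRangesFinish full (numLineRangesLoop full rest i (nums, true, start)) =
        nums ++ ((String.ofList (taken ++ rest.takeWhile Char.isDigit), (start : Int),
                  (i : Int) + ((rest.takeWhile Char.isDigit).length : Int) - 1) ::
                 numLineRangesRuns (rest.dropWhile Char.isDigit)
                   (i + (rest.takeWhile Char.isDigit).length))) := by
  induction rest with
  | nil =>
    constructor
    · intro i start nums _ _
      simp [numLineRangesLoop, numLineRangesFinish, numLineRangesRuns]
    · intro i start taken nums hile hdrop htaken hlen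
      have hi : i = full.length := by
        have := List.drop_eq_nil_iff.mp hdrop.symm
        omega
      have hslice : PySem.List.slice full (some (start : Int)) none = taken := by
        rw [PySem.List.slice_from_natCast]
        simpa using htaken
      simp [numLineRangesLoop, numLineRangesFinish, numLineRangesRuns, hslice, hi]
  | cons c rest' ih =>
    have step : ∀ i : Nat, c :: rest' = full.drop i → rest' = full.drop (i + 1) ∧ i < full.length := by
      intro i h
      have hlen : (full.drop i).length = full.length - i := by simp
      rw [← h] at hlen
      constructor
      · have : full.drop (i + 1) = (full.drop i).drop 1 := by
          rw [List.drop_drop]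
        rw [this, ← h]; simp
      · simp at hlen; omega
    constructor
    · intro i start nums hile hdrop
      obtain ⟨hrest', hilt⟩ := step i hdrop
      by_cases hd : c.isDigit
      · have h2 := (ih.2) (i + 1) i [c] nums (by omega) hrest'
          (by rw [← hdrop]; simp) (by simp)
        rw [numLineRangesLoop]
        simp only [hd, Bool.not_false, Bool.and_self, reduceIte]
        rw [h2, numLineRangesRuns]
        simp only [hd, reduceIte]
        simp
        omega
      · have h1 := (ih.1) (i + 1) start nums (by omega) hrest'
        rw [numLineRangesLoop]
        simp only [hd, Bool.not_false, Bool.and_false, Bool.and_true, Bool.false_eq_true,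
          if_false]
        rw [h1, numLineRangesRuns]
        simp [hd]
    · intro i start taken nums hile hdrop htaken hlen
      obtain ⟨hrest', hilt⟩ := step i hdrop
      by_cases hd : c.isDigit
      · have h2 := (ih.2) (i + 1) start (taken ++ [c]) nums (by omega) hrest'
          (by rw [htaken]; simp) (by simp; omega)
        rw [numLineRangesLoop]
        simp only [hd, Bool.not_true, Bool.false_and, Bool.and_false, Bool.false_eq_true, if_false]
        rw [h2]
        simp [hd, List.append_assoc]
        refine ⟨by omega, ?_⟩
        congr 1
        omega
      · have hslice : PySem.List.slice full (some (start : Int)) (some (i : Int)) = taken := by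
          rw [PySem.List.slice_natCast]
          rw [htaken, hlen]
          simp
        have h1 := (ih.1) (i + 1) start
          (nums ++ [(String.ofList taken, (start : Int), (i : Int) - 1)]) (by omega) hrest'
        rw [numLineRangesLoop]
        simp only [hd, Bool.not_true, Bool.false_and, Bool.true_and, Bool.not_false, Bool.false_eq_true, if_false, reduceIte]
        rw [hslice, h1]
        simp [hd, numLineRangesRuns]

-- ===== VERDICT (by name: the statement is the Claim_ definition above) =====
theorem numLineRanges_spec : Claim_equal_numLineRanges := by
  intro line _
  show numLineRanges line = numLineRanges_alt line
  have h := (numLineRanges_invariant line.toList line.toList).1 0 0 [] (by simp) (by simp)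
  rcases hloop : numLineRangesLoop line.toList line.toList 0 ([], false, 0) with ⟨nums, inN, start⟩
  rw [hloop] at h
  unfold numLineRanges numLineRanges_alt
  simp only [hloop]
  simp only [numLineRangesFinish, List.nil_append] at h
  cases inN
  · simpa using h
  · simpa using h
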